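-- pv_equiv track=rewrite | github.com/Phobetore/pi-Bot | sirrmizan/dice_parser.py | _split_trailing_ops
-- ===== SOURCE A (Python) =====
-- def _split_trailing_ops(tokens: list[str]) -> list[str]:
--     """Split off trailing ``+``/``-`` characters from compound tokens.
--
--     ``['1d20+', 'Goblin']`` → ``['1d20', '+', 'Goblin']``.
--     ``['1d20++']``          → ``['1d20', '+', '+']``.
--
--     Tokens that ARE just an operator (``+``, ``-``) are left alone.
--     """
--     out: list[str] = []
--     for tok in tokens:
--         trailing: list[str] = []
--         while len(tok) > 1 and tok[-1] in "+-":
--             trailing.append(tok[-1])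
--             tok = tok[:-1]
--         out.append(tok)
--         out.extend(reversed(trailing))
--     return out
-- ===== SOURCE B (Python) =====
-- def _split_trailing_ops(tokens):
--     """Split off trailing +/- characters from compound tokens.
--
--     Counts the trailing run of '+'/'-' (capped so the base keeps at least
--     one character) and splits with one slice instead of peeling char by char.
--     """
--     out = []
--     for tok in tokens:
--         n = len(tok)
--         k = 0
--         while k < n - 1 and tok[n - 1 - k] in "+-":
--             k += 1
--         out.append(tok[:n - k])
--         out.extend(tok[n - k:])
--     return out
-- ===== Notes on version B (the rewrite author's own statement) =====
-- stated objective: alternative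
-- what changed: Instead of repeatedly peeling the last character with tok = tok[:-1] into a 'trailing' list that is then reversed, B scans backward counting the trailing run of '+'/'-' (capped so the base keeps one character) and splits the token with a single slice, extending the output with the suffix directly in order.
import Mathlib
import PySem

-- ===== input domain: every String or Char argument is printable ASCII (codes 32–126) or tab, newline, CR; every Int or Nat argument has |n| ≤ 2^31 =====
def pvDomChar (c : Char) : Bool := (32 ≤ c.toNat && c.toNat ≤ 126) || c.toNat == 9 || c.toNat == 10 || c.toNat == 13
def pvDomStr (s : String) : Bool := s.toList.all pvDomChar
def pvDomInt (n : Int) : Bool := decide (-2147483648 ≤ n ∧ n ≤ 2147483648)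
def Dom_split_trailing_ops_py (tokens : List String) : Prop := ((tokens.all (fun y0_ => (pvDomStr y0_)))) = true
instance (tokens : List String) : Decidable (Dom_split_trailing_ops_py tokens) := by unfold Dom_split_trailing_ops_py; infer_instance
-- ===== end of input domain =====

-- B replaces A's char-by-char peeling (tok = tok[:-1]) and list reversal by one
-- backward count of the trailing '+'/'-' run and a single slice; same values, different decomposition.

-- ===== PORT A =====
-- inner while loop of A: peel trailing '+'/'-' while more than one char remains
def pvPeelA (tok trailing : List Char) : List Char × List Char :=
  if h : 1 < tok.length then
    let c := tok.getLast (by intro he; simp [he] at h)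
    if c = '+' ∨ c = '-' then pvPeelA tok.dropLast (trailing ++ [c])
    else (tok, trailing)
  else (tok, trailing)
termination_by tok.length
decreasing_by simp [List.length_dropLast]; omega

def split_trailing_ops_py (tokens : List String) : List String :=
  tokens.foldl (fun out tok =>
    let p := pvPeelA tok.toList []
    out ++ [String.mk p.1] ++ (p.2.reverse.map fun c => String.mk [c])) []

-- ===== PORT B =====
-- inner while loop of B: count the trailing run of '+'/'-', capped at n-1
def pvCountTrail (tok : List Char) (n k : Nat) : Nat :=
  if k < n - 1 ∧ (tok.getD (n - 1 - k) ' ' = '+' ∨ tok.getD (n - 1 - k) ' ' = '-') then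
    pvCountTrail tok n (k + 1)
  else k
termination_by n - k
decreasing_by rename_i h; exact Nat.sub_succ_lt_self n k (Nat.lt_of_lt_of_le h.1 (Nat.sub_le n 1))

def split_trailing_ops_py_alt (tokens : List String) : List String :=
  tokens.foldl (fun out tok =>
    let n := tok.toList.length
    let k := pvCountTrail tok.toList n 0
    out ++ [String.mk (tok.toList.take (n - k))]
        ++ ((tok.toList.drop (n - k)).map fun c => String.mk [c])) []

-- ===== PRECONDITION & SPEC =====
def Spec_split_trailing_ops_py (tokens : List String) (out : List String) : Prop := out = split_trailing_ops_py_alt tokens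
instance (tokens : List String) (out : List String) : Decidable (Spec_split_trailing_ops_py tokens out) := by unfold Spec_split_trailing_ops_py; infer_instance

-- ===== CLAIM (what is proved, stated in full; the proofs are below) =====
def Claim_equal_split_trailing_ops_py : Prop := ∀ (tokens : List String), Dom_split_trailing_ops_py tokens → Spec_split_trailing_ops_py tokens (split_trailing_ops_py tokens)

-- ===== LEMMAS AND PROOFS =====

theorem getD_dropLast (l : List Char) (i : Nat) (h : i < l.length - 1) (x : Char) :
    l.dropLast.getD i x = l.getD i x := by
  simp only [List.getD, List.getElem?_dropLast, if_pos h]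

theorem countTrail_shift (tok : List Char) :
    ∀ (d k : Nat), tok.length - k ≤ d →
      pvCountTrail tok tok.length (k + 1) = 1 + pvCountTrail tok.dropLast (tok.length - 1) k := by
  intro d
  induction d with
  | zero =>
    intro k hk
    unfold pvCountTrail
    rw [if_neg (by omega), if_neg (by omega)]
    omega
  | succ d ih =>
    intro k hk
    by_cases hcond : k < tok.length - 2 ∧
        (tok.getD (tok.length - 2 - k) ' ' = '+' ∨ tok.getD (tok.length - 2 - k) ' ' = '-')
    · have hidx : tok.length - 2 - k < tok.length - 1 := by omega
      have he1 : tok.length - 1 - (k + 1) = tok.length - 2 - k := by omega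
      have he2 : tok.length - 1 - 1 - k = tok.length - 2 - k := by omega
      conv_lhs => rw [pvCountTrail]
      conv_rhs => rw [pvCountTrail]
      rw [if_pos (by rw [he1]; exact ⟨by omega, hcond.2⟩),
          if_pos (by rw [he2, getD_dropLast _ _ hidx]; exact ⟨by omega, hcond.2⟩)]
      exact ih (k + 1) (by omega)
    · conv_lhs => rw [pvCountTrail]
      conv_rhs => rw [pvCountTrail]
      rw [if_neg (by
            rintro ⟨h1, h2⟩
            have he1 : tok.length - 1 - (k + 1) = tok.length - 2 - k := by omega
            rw [he1] at h2
            exact hcond ⟨by omega, h2⟩),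
          if_neg (by
            rintro ⟨h1, h2⟩
            have hidx : tok.length - 1 - 1 - k < tok.length - 1 := by omega
            rw [getD_dropLast _ _ hidx] at h2
            have he2 : tok.length - 1 - 1 - k = tok.length - 2 - k := by omega
            rw [he2] at h2
            exact hcond ⟨by omega, h2⟩)]
      omega

theorem peel_eq : ∀ (tok tr : List Char),
    pvPeelA tok tr =
      (tok.take (tok.length - pvCountTrail tok tok.length 0),
       tr ++ (tok.drop (tok.length - pvCountTrail tok tok.length 0)).reverse) := by
  intro tok
  induction hn : tok.length using Nat.strong_induction_on generalizing tok with
  | _ n ih =>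
  intro tr
  subst hn
  by_cases h1 : 1 < tok.length
  · have hne : tok ≠ [] := by intro he; simp [he] at h1
    set c := tok.getLast hne with hc
    have hlt : tok.length - 1 - 0 < tok.length := by omega
    have hlastD : tok.getD (tok.length - 1 - 0) ' ' = c := by
      simp only [List.getD]
      rw [List.getElem?_eq_getElem hlt]
      simp [hc, List.getLast_eq_getElem]
    by_cases hop : c = '+' ∨ c = '-'
    · -- A recurses; count = 1 + count on dropLast
      have hA : pvPeelA tok tr = pvPeelA tok.dropLast (tr ++ [c]) := by
        rw [pvPeelA]; rw [dif_pos h1, if_pos hop]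
      have hcnt : pvCountTrail tok tok.length 0 =
          1 + pvCountTrail tok.dropLast (tok.length - 1) 0 := by
        conv_lhs => rw [pvCountTrail]
        rw [if_pos ⟨by omega, by rw [hlastD]; exact hop⟩]
        exact countTrail_shift tok tok.length 0 (by omega)
      have hdlen : tok.dropLast.length = tok.length - 1 := by simp
      have hIH := ih tok.dropLast.length (by omega) tok.dropLast rfl (tr ++ [c])
      rw [hA, hIH, hcnt]
      set c' := pvCountTrail tok.dropLast (tok.length - 1) 0 with hc'
      have hc'd : pvCountTrail tok.dropLast tok.dropLast.length 0 = c' := by rw [hdlen]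
      rw [hc'd]
      have hm : tok.dropLast.length - c' = tok.length - (1 + c') := by omega
      have hsplit : tok = tok.dropLast ++ [c] := (List.dropLast_concat_getLast hne).symm
      rw [hm]
      set m := tok.length - (1 + c') with hmdef
      have hmle : m ≤ tok.dropLast.length := by omega
      have hdrop : tok.drop m = tok.dropLast.drop m ++ [c] := by
        conv_lhs => rw [hsplit]
        exact List.drop_append_of_le_length hmle
      have htake : tok.dropLast.take m = tok.take m := by
        rw [List.dropLast_eq_take, List.take_take]
        congr 1
        omega
      rw [Prod.mk.injEq]
      refine ⟨htake, ?_⟩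
      rw [hdrop]
      simp
    · -- last char not an op: count = 0, A stops
      have hA : pvPeelA tok tr = (tok, tr) := by
        rw [pvPeelA]; rw [dif_pos h1, if_neg hop]
      have hcnt : pvCountTrail tok tok.length 0 = 0 := by
        rw [pvCountTrail]
        rw [if_neg (by rintro ⟨_, h2⟩; rw [hlastD] at h2; exact hop h2)]
      simp [hA, hcnt]
  · -- token of length ≤ 1: count = 0
    have hA : pvPeelA tok tr = (tok, tr) := by
      rw [pvPeelA]; rw [dif_neg h1]
    have hcnt : pvCountTrail tok tok.length 0 = 0 := by
      rw [pvCountTrail]; rw [if_neg (by omega)]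
    simp [hA, hcnt]

theorem step_eq :
    (fun (out : List String) (tok : String) =>
      let p := pvPeelA tok.toList []
      out ++ [String.mk p.1] ++ (p.2.reverse.map fun c => String.mk [c])) =
    (fun (out : List String) (tok : String) =>
      let n := tok.toList.length
      let k := pvCountTrail tok.toList n 0
      out ++ [String.mk (tok.toList.take (n - k))]
          ++ ((tok.toList.drop (n - k)).map fun c => String.mk [c])) := by
  funext out tok
  simp only [peel_eq tok.toList [], List.nil_append, List.reverse_reverse]

-- ===== VERDICT (by name: the statement is the Claim_ definition above) =====
theorem split_trailing_ops_py_spec : Claim_equal_split_trailing_ops_py := by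
  intro tokens _
  unfold Spec_split_trailing_ops_py split_trailing_ops_py split_trailing_ops_py_alt
  rw [step_eq]
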